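-- pv_equiv track=rewrite | github.com/jinhwanlazy/problem-solving | boj_1918/solution.py | parse
-- ===== SOURCE A (Python) =====
-- def parse(eq):
--     S = []
--     res = []
--     for i, c in enumerate(eq):
--         if c == '(':
--             S.append(i)
--         elif not S:
--             res.append(c)
--         elif c == ')':
--             j = S.pop()
--             if not S:
--                 res.append(eq[j:i+1])
--     if len(res) == 1 and res[0] == eq:
--         return parse(eq[1:-1])
--     return res
-- ===== SOURCE B (Python) =====
-- def parse(eq):
--     def tokens(s):
--         res = []
--         i = 0
--         n = len(s)
--         while i < n:
--             c = s[i]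
--             if c != '(':
--                 res.append(c)
--                 i += 1
--             else:
--                 d = 1
--                 j = i + 1
--                 while j < n:
--                     if s[j] == '(':
--                         d += 1
--                     elif s[j] == ')':
--                         d -= 1
--                         if d == 0:
--                             break
--                     j += 1
--                 if d != 0:
--                     return res  # unmatched '(' : nothing after it is ever emitted
--                 res.append(s[i:j + 1])
--                 i = j + 1
--         return res
--
--     res = tokens(eq)
--     while len(res) == 1 and res[0] == eq:
--         eq = eq[1:-1]
--         res = tokens(eq)
--     return res
-- ===== Notes on version B (the rewrite author's own statement) =====
-- stated objective: alternative
-- what changed: Replaces the single enumerate pass with an index stack by a recursive-descent tokenizer that, at each top-level opening parenthesis, scans ahead with a depth counter for the matching closing parenthesis and emits the whole group at once, and replaces the outer tail recursion by a while loop that strips outer parentheses.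
import Mathlib
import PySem

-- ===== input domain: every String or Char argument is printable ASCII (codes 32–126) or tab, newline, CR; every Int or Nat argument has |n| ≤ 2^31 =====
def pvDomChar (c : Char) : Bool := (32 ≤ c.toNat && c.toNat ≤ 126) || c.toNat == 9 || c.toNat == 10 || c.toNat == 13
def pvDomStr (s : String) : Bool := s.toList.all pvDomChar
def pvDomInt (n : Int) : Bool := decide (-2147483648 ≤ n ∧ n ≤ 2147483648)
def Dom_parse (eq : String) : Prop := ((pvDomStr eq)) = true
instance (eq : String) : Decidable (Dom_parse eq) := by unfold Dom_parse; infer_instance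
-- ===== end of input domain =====

-- B replaces A's stack-driven single pass by a recursive-descent tokenizer (scan ahead
-- for the matching ')' at each top-level '(') and A's outer recursion by a while loop
-- (objective: alternative).

-- eq[1:-1] shrinks a nonempty string: cited by both ports' decreasing_by
lemma pvSliceMidLen (eq : List Char) (h : eq ≠ []) :
    (PySem.List.slice eq (some 1) (some (-1))).length < eq.length := by
  rw [PySem.List.length_slice]
  have h1 := PySem.List.clampIdx_neg_one (n := eq.length)
  have h2 : PySem.List.clampIdx eq.length 1 = min 1 eq.length := by
    simp
  have h0 : 0 < eq.length := List.length_pos_iff.mpr h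
  omega

-- ===== PORT A =====
-- A's loop body: stack S of opening-parenthesis indices; top-level chars appended
-- to res; on a closing parenthesis pop, and when the stack empties append the
-- slice eq[j:i+1].
def parseStepA (eq : List Char) (st : List Int × List (List Char)) (p : Int × Char) :
    List Int × List (List Char) :=
  if p.2 = '(' then (st.1 ++ [p.1], st.2)
  else if st.1 = [] then (st.1, st.2 ++ [[p.2]])
  else if p.2 = ')' then
    let j := st.1.getLast!
    let S := st.1.dropLast
    if S = [] then (S, st.2 ++ [PySem.List.slice eq (some j) (some (p.1 + 1))])
    else (S, st.2)
  else st

def parseScanA (eq : List Char) : List (List Char) :=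
  ((PySem.List.enumerate eq).foldl (parseStepA eq) ([], [])).2

def parseChars (eq : List Char) : List (List Char) :=
  let res := parseScanA eq
  if h : res.length = 1 ∧ res[0]! = eq then
    parseChars (PySem.List.slice eq (some 1) (some (-1)))
  else res
termination_by eq.length
decreasing_by
  refine pvSliceMidLen eq ?_
  have hres : res = parseScanA eq := rfl
  rintro rfl
  rw [hres, show parseScanA ([] : List Char) = [] from rfl] at h
  simp at h

def parse (eq : String) : List String := (parseChars eq.toList).map String.ofList

-- ===== PORT B =====
-- B's inner while loop at a '(' : scan ahead with depth counter d, returning the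
-- group body (through its matching ')') and the rest; none = unmatched '('.
def splitGroup : List Char → Nat → Option (List Char × List Char)
  | [], _ => none
  | c :: t, d =>
    if c = ')' then
      if d = 1 then some ([c], t)
      else (splitGroup t (d - 1)).map (fun p => (c :: p.1, p.2))
    else if c = '(' then
      (splitGroup t (d + 1)).map (fun p => (c :: p.1, p.2))
    else
      (splitGroup t d).map (fun p => (c :: p.1, p.2))

-- splitGroup splits its input: cited by tokensB's decreasing_by
lemma pvSplitGroup_append : ∀ (t : List Char) (d : Nat) (g r : List Char),
    splitGroup t d = some (g, r) → g ++ r = t := by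
  intro t
  induction t with
  | nil => intro d g r h; simp [splitGroup] at h
  | cons c t ih =>
    intro d g r h
    rw [splitGroup] at h
    split_ifs at h with hc hd hp
    · simp only [Option.some.injEq, Prod.mk.injEq] at h
      rw [← h.1, ← h.2]; rfl
    · rcases Option.map_eq_some_iff.mp h with ⟨⟨g', r'⟩, hg, he⟩
      cases he; simpa using ih _ _ _ hg
    · rcases Option.map_eq_some_iff.mp h with ⟨⟨g', r'⟩, hg, he⟩
      cases he; simpa using ih _ _ _ hg
    · rcases Option.map_eq_some_iff.mp h with ⟨⟨g', r'⟩, hg, he⟩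
      cases he; simpa using ih _ _ _ hg

-- B's outer while loop over i: each top-level char is a token; at a '(' the whole
-- group is one token and scanning resumes after it; unmatched '(' ends the scan.
def tokensB : List Char → List (List Char)
  | [] => []
  | c :: t =>
    if c = '(' then
      match hsg : splitGroup t 1 with
      | none => []
      | some (g, r) => (c :: g) :: tokensB r
    else [c] :: tokensB t
termination_by s => s.length
decreasing_by
  · have := pvSplitGroup_append t 1 g r hsg
    have : g.length + r.length = t.length := by rw [← this]; simp
    simp; omega
  · simp

-- B's 'while len(res)==1 and res[0]==eq: eq = eq[1:-1]; res = tokens(eq)'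
-- rendered as the equivalent tail recursion.
def parseAltChars (eq : List Char) : List (List Char) :=
  let res := tokensB eq
  if h : res.length = 1 ∧ res[0]! = eq then
    parseAltChars (PySem.List.slice eq (some 1) (some (-1)))
  else res
termination_by eq.length
decreasing_by
  refine pvSliceMidLen eq ?_
  have hres : res = tokensB eq := rfl
  rintro rfl
  rw [hres] at h
  rw [show tokensB ([] : List Char) = [] from by rw [tokensB]] at h
  simp at h

def parse_alt (eq : String) : List String := (parseAltChars eq.toList).map String.ofList

-- ===== PRECONDITION & SPEC =====
def Spec_parse (eq : String) (out : List String) : Prop := out = parse_alt eq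
instance (eq : String) (out : List String) : Decidable (Spec_parse eq out) := by unfold Spec_parse; infer_instance

-- ===== CLAIM (what is proved, stated in full; the proofs are below) =====
def Claim_equal_parse : Prop := ∀ (eq : String), Dom_parse eq → Spec_parse eq (parse eq)

-- ===== LEMMAS AND PROOFS =====

-- The main invariant, by strong induction on the suffix length n. For a suffix t of
-- eq starting at position k:
-- (empty stack)  A's fold from ([], res) yields res ++ tokensB t;
-- (stack S ≠ []) A's fold from (S, res) is governed by splitGroup t S.length: if it
--   fails the stack never empties and res is final; if it returns (g, r) the one
--   token eq[S.head! : k + g.length] is appended when the stack empties, then the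
--   scan continues over r with an empty stack.
lemma pvMain (eq : List Char) : ∀ (n : Nat) (t : List Char) (k : Nat),
    t.length ≤ n → eq.drop k = t →
    (∀ res, ((PySem.List.enumerate t (k : Int)).foldl (parseStepA eq) ([], res)).2
        = res ++ tokensB t)
    ∧ (∀ (S : List Int) res, S ≠ [] →
        ((PySem.List.enumerate t (k : Int)).foldl (parseStepA eq) (S, res)).2
          = match splitGroup t S.length with
            | none => res
            | some (g, r) =>
                res ++ PySem.List.slice eq (some S.head!) (some ((k : Int) + g.length))
                    :: tokensB r) := by
  intro n
  induction n with
  | zero =>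
    intro t k ht _
    have he : t = [] := List.length_eq_zero_iff.mp (Nat.le_zero.mp ht)
    subst he
    constructor
    · intro res
      rw [show tokensB ([] : List Char) = [] from by rw [tokensB]]
      simp only [PySem.List.enumerate_nil, List.foldl_nil, List.append_nil]
    · intro S res _
      simp only [PySem.List.enumerate_nil, List.foldl_nil, splitGroup]
  | succ n ih =>
    intro t k ht hdrop
    cases t with
    | nil =>
      constructor
      · intro res
        rw [show tokensB ([] : List Char) = [] from by rw [tokensB]]
        simp only [PySem.List.enumerate_nil, List.foldl_nil, List.append_nil]
      · intro S res _
        simp only [PySem.List.enumerate_nil, List.foldl_nil, splitGroup]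
    | cons c t' =>
      have hdrop' : eq.drop (k + 1) = t' := by
        rw [← List.drop_drop, hdrop, List.drop_one, List.tail_cons]
      have ht' : t'.length ≤ n := by simp at ht; omega
      have ih' := ih t' (k + 1) ht' hdrop'
      have henum : PySem.List.enumerate (c :: t') (k : Int)
          = ((k : Int), c) :: PySem.List.enumerate t' (((k + 1 : Nat) : Int)) := by
        push_cast
        simp only [PySem.List.enumerate_cons]
      constructor
      · -- empty-stack part
        intro res
        rw [henum, List.foldl_cons]
        by_cases hc : c = '('
        · subst hc
          rw [show parseStepA eq ([], res) ((k : Int), '(') = ([(k : Int)], res) from by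
            simp [parseStepA]]
          rw [ih'.2 [(k : Int)] res (by simp)]
          rw [show ([(k : Int)] : List Int).length = 1 from rfl]
          cases hsg : splitGroup t' 1 with
          | none =>
            have hrhs : tokensB ('(' :: t') = [] := by
              rw [tokensB, if_pos rfl]
              split
              · rfl
              · rename_i g' r' hsome
                rw [hsome] at hsg; cases hsg
            rw [hrhs]
            simp
          | some gr =>
            obtain ⟨g, r⟩ := gr
            have htk : PySem.List.slice eq (some ((k : Nat) : Int))
                (some (((k + 1 : Nat) : Int) + (g.length : Int))) = '(' :: g := by
              have hb : ((k + 1 : Nat) : Int) + (g.length : Int)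
                  = ((k + 1 + g.length : Nat) : Int) := by push_cast; ring
              rw [hb, PySem.List.slice_natCast, hdrop,
                show k + 1 + g.length - k = g.length + 1 from by omega]
              rw [List.take_succ_cons, ← pvSplitGroup_append t' 1 g r hsg,
                List.take_left]
            have hrhs : tokensB ('(' :: t') = ('(' :: g) :: tokensB r := by
              rw [tokensB, if_pos rfl]
              split
              · rename_i hnone
                rw [hnone] at hsg; cases hsg
              · rename_i g' r' hsome
                rw [hsome] at hsg
                simp only [Option.some.injEq, Prod.mk.injEq] at hsg
                rw [hsg.1, hsg.2]
            rw [hrhs]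
            push_cast at htk ⊢
            simp [htk]
        · rw [show parseStepA eq ([], res) ((k : Int), c) = ([], res ++ [[c]]) from by
            simp [parseStepA, hc]]
          rw [ih'.1 (res ++ [[c]])]
          rw [tokensB, if_neg hc]
          simp
      · -- nonempty-stack part
        rintro ⟨⟩ res hS
        · exact absurd rfl hS
        rename_i a S'
        rw [henum, List.foldl_cons]
        by_cases hc : c = '('
        · subst hc
          rw [show parseStepA eq (a :: S', res) ((k : Int), '(')
              = ((a :: S') ++ [(k : Int)], res) from by simp [parseStepA]]
          rw [ih'.2 ((a :: S') ++ [(k : Int)]) res (by simp)]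
          rw [show splitGroup ('(' :: t') (a :: S').length
              = (splitGroup t' ((a :: S').length + 1)).map
                  (fun p => ('(' :: p.1, p.2)) from by
            rw [splitGroup]; simp]
          rw [show ((a :: S') ++ [(k : Int)]).length = (a :: S').length + 1 from by simp]
          cases hsg : splitGroup t' ((a :: S').length + 1) with
          | none => simp
          | some gr =>
            obtain ⟨g, r⟩ := gr
            have hb : ((k + 1 : Nat) : Int) + (g.length : Int)
                = ((k : Nat) : Int) + ((('(' :: g).length : Nat) : Int) := by
              push_cast; simp; ring
            simp only [Option.map_some]
            rw [show ((a :: S') ++ [(k : Int)]).head! = (a :: S').head! from by simp]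
            rw [hb]
        · by_cases hq : c = ')'
          · subst hq
            cases S' with
            | nil =>
              rw [show parseStepA eq ([a], res) ((k : Int), ')')
                  = ([], res ++ [PySem.List.slice eq (some a) (some ((k : Int) + 1))])
                  from by simp [parseStepA]]
              rw [ih'.1 (res ++ [PySem.List.slice eq (some a) (some ((k : Int) + 1))])]
              rw [show splitGroup (')' :: t') ([a] : List Int).length
                  = some ([')'], t') from by rw [splitGroup]; simp]
              simp
            | cons b S'' =>
              rw [show parseStepA eq (a :: b :: S'', res) ((k : Int), ')')
                  = ((a :: b :: S'').dropLast, res) from by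
                simp [parseStepA, List.dropLast_cons_of_ne_nil]]
              have hdl : (a :: b :: S'').dropLast = a :: (b :: S'').dropLast := by simp
              rw [ih'.2 _ res (by rw [hdl]; exact List.cons_ne_nil _ _)]
              rw [show splitGroup (')' :: t') (a :: b :: S'').length
                  = (splitGroup t' ((a :: b :: S'').length - 1)).map
                      (fun p => (')' :: p.1, p.2)) from by
                rw [splitGroup]; simp]
              rw [show (a :: b :: S'').dropLast.length = (a :: b :: S'').length - 1 from by
                simp]
              cases hsg : splitGroup t' ((a :: b :: S'').length - 1) with
              | none => simp
              | some gr =>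
                obtain ⟨g, r⟩ := gr
                have hb : ((k + 1 : Nat) : Int) + (g.length : Int)
                    = ((k : Nat) : Int) + (((')' :: g).length : Nat) : Int) := by
                  push_cast; simp; ring
                simp only [Option.map_some]
                rw [show (a :: b :: S'').dropLast.head! = (a :: b :: S'').head! from by
                  rw [hdl]; rfl]
                rw [hb]
          · rw [show parseStepA eq (a :: S', res) ((k : Int), c) = (a :: S', res) from by
              simp [parseStepA, hc, hq]]
            rw [ih'.2 (a :: S') res hS]
            rw [show splitGroup (c :: t') (a :: S').length
                = (splitGroup t' (a :: S').length).map
                    (fun p => (c :: p.1, p.2)) from by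
              rw [splitGroup]; simp [hc, hq]]
            cases hsg : splitGroup t' (a :: S').length with
            | none => simp
            | some gr =>
              obtain ⟨g, r⟩ := gr
              have hb : ((k + 1 : Nat) : Int) + (g.length : Int)
                  = ((k : Nat) : Int) + (((c :: g).length : Nat) : Int) := by
                push_cast; simp; ring
              simp only [Option.map_some]
              rw [hb]

lemma pvScan_eq (eq : List Char) : parseScanA eq = tokensB eq := by
  have h := (pvMain eq eq.length eq 0 le_rfl (by simp)).1 []
  simpa [parseScanA] using h

lemma pvChars_eq : ∀ (n : Nat) (eq : List Char), eq.length ≤ n →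
    parseChars eq = parseAltChars eq := by
  intro n
  induction n with
  | zero =>
    intro eq h
    have he : eq = [] := List.length_eq_zero_iff.mp (Nat.le_zero.mp h)
    subst he
    rw [parseChars, parseAltChars]
    rw [show parseScanA ([] : List Char) = [] from rfl,
      show tokensB ([] : List Char) = [] from by rw [tokensB]]
    simp
  | succ n ih =>
    intro eq h
    rw [parseChars, parseAltChars, pvScan_eq]
    by_cases hc : (tokensB eq).length = 1 ∧ (tokensB eq)[0]! = eq
    · rw [dif_pos hc, dif_pos hc]
      have hne : eq ≠ [] := by
        rintro rfl
        rw [show tokensB ([] : List Char) = [] from by rw [tokensB]] at hc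
        simp at hc
      exact ih _ (by have := pvSliceMidLen eq hne; omega)
    · rw [dif_neg hc, dif_neg hc]

-- ===== VERDICT (by name: the statement is the Claim_ definition above) =====
theorem parse_spec : Claim_equal_parse := by
  intro eq _
  unfold Spec_parse parse parse_alt
  rw [pvChars_eq eq.toList.length eq.toList le_rfl]
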